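-- pv_equiv track=rewrite | github.com/srichandra707/AI_Interviewer_Innov8_3.0_Finals | unixcoder-stuff/code7.py | _find_loop_code
-- ===== SOURCE A (Python) =====
-- def _find_loop_code(code: str) -> str:
--     lines = code.split('\n')
--     for i, line in enumerate(lines):
--         if 'for ' in line:
--             for j in range(i+1, min(len(lines), i+3)):
--                 if 'for ' in lines[j]:
--                     return f"{line.strip()}\n{lines[j].strip()}"
--     return code[:50]
-- ===== SOURCE B (Python) =====
-- def _find_loop_code(code: str) -> str:
--     lines = code.split('\n')
--     hits = [(i, ln) for i, ln in enumerate(lines) if 'for ' in ln]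
--     for (i, a), (j, b) in zip(hits, hits[1:]):
--         if j - i <= 2:
--             return f"{a.strip()}\n{b.strip()}"
--     return code[:50]
-- ===== Notes on version B (the rewrite author's own statement) =====
-- stated objective: alternative
-- what changed: Replaces A's nested scan (for each line containing 'for ', probe the next two lines by index) with a single filtering pass that collects all (index, line) hits and then checks consecutive pairs of that hit list for a gap of at most 2; no inner window loop and no indexing back into the line list.
import Mathlib
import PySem

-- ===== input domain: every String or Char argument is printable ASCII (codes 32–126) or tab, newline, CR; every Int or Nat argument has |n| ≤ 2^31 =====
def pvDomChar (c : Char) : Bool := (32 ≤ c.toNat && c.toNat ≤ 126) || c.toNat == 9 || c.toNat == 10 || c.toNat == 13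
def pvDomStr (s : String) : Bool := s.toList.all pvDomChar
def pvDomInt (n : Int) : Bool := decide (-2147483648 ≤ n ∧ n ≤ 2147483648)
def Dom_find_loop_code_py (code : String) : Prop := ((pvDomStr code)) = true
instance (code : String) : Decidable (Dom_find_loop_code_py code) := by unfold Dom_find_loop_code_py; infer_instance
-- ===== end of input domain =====

-- B replaces A's nested window scan by one filtering pass over (index, line) pairs
-- followed by a consecutive-pair gap check (objective: alternative decomposition).

-- ===== PORT A =====
-- Transliteration notes: code.split('\n') is PySem.Str.split? (always `some`, the
-- separator is non-empty, so .getD [] is exact); lines[j] is pyGetD (j always in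
-- range here); the f-string "{a}\n{b}" is join "\n" [a, b].
def find_loop_code_py (code : String) : String :=
  let lines := (PySem.Str.split? code "\n").getD []
  match (PySem.List.enumerate lines).findSome? (fun p =>
      if PySem.Str.isIn "for " p.2 then
        (PySem.List.pyRange (p.1 + 1) (min (PySem.List.len lines) (p.1 + 3))).findSome?
          (fun j =>
            let lj := PySem.List.pyGetD lines j ""
            if PySem.Str.isIn "for " lj then
              some (PySem.Str.join "\n" [PySem.Str.strip p.2, PySem.Str.strip lj])
            else none)
      else none) with
  | some r => r
  | none => PySem.Str.slice code none (some 50)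

-- ===== PORT B =====
def find_loop_code_py_alt (code : String) : String :=
  let lines := (PySem.Str.split? code "\n").getD []
  let hits := (PySem.List.enumerate lines).filter (fun p => PySem.Str.isIn "for " p.2)
  match (hits.zip hits.tail).find? (fun q => decide (q.2.1 - q.1.1 ≤ 2)) with
  | some q => PySem.Str.join "\n" [PySem.Str.strip q.1.2, PySem.Str.strip q.2.2]
  | none => PySem.Str.slice code none (some 50)

-- ===== PRECONDITION & SPEC =====
def Spec_find_loop_code_py (code : String) (out : String) : Prop := out = find_loop_code_py_alt code
instance (code : String) (out : String) : Decidable (Spec_find_loop_code_py code out) := by unfold Spec_find_loop_code_py; infer_instance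

-- ===== CLAIM (what is proved, stated in full; the proofs are below) =====
def Claim_equal_find_loop_code_py : Prop := ∀ (code : String), Dom_find_loop_code_py code → Spec_find_loop_code_py code (find_loop_code_py code)

-- ===== LEMMAS AND PROOFS =====

-- B's consecutive-pair search, as a structural recursion (proof-side only).
def pvZf (hs : List (Int × String)) : Option ((Int × String) × (Int × String)) :=
  (hs.zip hs.tail).find? (fun q => decide (q.2.1 - q.1.1 ≤ 2))

lemma pvZf_single (a : Int × String) : pvZf [a] = none := rfl

lemma pvZf_cons₂ (a b : Int × String) (t : List (Int × String)) :
    pvZf (a :: b :: t) = if b.1 - a.1 ≤ 2 then some (a, b) else pvZf (b :: t) := by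
  unfold pvZf
  by_cases h : b.1 - a.1 ≤ 2
  · have h' : b.1 ≤ 2 + a.1 := by omega
    simp [h, h']
  · have h' : ¬ b.1 ≤ 2 + a.1 := by omega
    simp [h, h']

lemma pvZf_drop (a : Int × String) (hs : List (Int × String))
    (hge : ∀ x ∈ hs, a.1 + 3 ≤ x.1) : pvZf (a :: hs) = pvZf hs := by
  cases hs with
  | nil => rfl
  | cons b t =>
    rw [pvZf_cons₂, if_neg]
    have := hge b (List.mem_cons_self ..)
    omega

lemma pvGetD_append {α : Type} (pref rest : List α) (k : Nat) (d : α) (hk : k < rest.length) :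
    PySem.List.pyGetD (pref ++ rest) ((pref.length : Int) + (k : Int)) d = rest[k] := by
  have h1 : ((pref.length : Int) + (k : Int)) = (((pref.length + k : Nat)) : Int) := by push_cast; ring
  rw [h1, PySem.List.pyGetD_natCast, List.getD_eq_getElem?_getD,
    List.getElem?_append_right (by omega)]
  simp [List.getElem?_eq_getElem hk]

lemma pvRange_two (a : Int) : PySem.List.pyRange a (a + 2) = [a, a + 1] := by
  rw [PySem.List.pyRange_one_cons (by omega), PySem.List.pyRange_one_cons (by omega),
    PySem.List.pyRange_one_eq_nil (by omega)]

-- Main invariant: on any suffix of the line list, A's nested scan returns exactly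
-- the strings B builds from the first consecutive pair of hits with gap ≤ 2.
lemma pvMain (lines : List String) (suf pref : List String) (h : lines = pref ++ suf) :
    (PySem.List.enumerate suf pref.length).findSome? (fun p =>
      if PySem.Str.isIn "for " p.2 then
        (PySem.List.pyRange (p.1 + 1) (min (PySem.List.len lines) (p.1 + 3))).findSome?
          (fun j =>
            let lj := PySem.List.pyGetD lines j ""
            if PySem.Str.isIn "for " lj then
              some (PySem.Str.join "\n" [PySem.Str.strip p.2, PySem.Str.strip lj])
            else none)
      else none)
    = (pvZf ((PySem.List.enumerate suf pref.length).filter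
        (fun p => PySem.Str.isIn "for " p.2))).map
        (fun q => PySem.Str.join "\n" [PySem.Str.strip q.1.2, PySem.Str.strip q.2.2]) := by
  induction suf generalizing pref with
  | nil => simp [PySem.List.enumerate, pvZf]
  | cons l t ih =>
    rw [PySem.List.enumerate_cons]
    by_cases hP : PySem.Str.isIn "for " l = true
    · simp at hP
      rcases t with _ | ⟨l1, t1⟩
      · -- suf = [l]: the window is empty
        have hr : PySem.List.pyRange ((pref.length : Int) + 1)
            (min ((lines.length : Int)) ((pref.length : Int) + 3)) = [] := by
          have hm : min ((lines.length : Int)) ((pref.length : Int) + 3)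
              = (pref.length : Int) + 1 := by rw [h]; simp
          rw [hm]; exact PySem.List.pyRange_one_eq_nil le_rfl
        simp [PySem.List.enumerate_nil, hP, hr, pvZf_single]
      · rcases t1 with _ | ⟨l2, t2⟩
        · -- suf = [l, l1]: the window is [pref.length + 1]
          have hr : PySem.List.pyRange ((pref.length : Int) + 1)
              (min ((lines.length : Int)) ((pref.length : Int) + 3))
              = [(pref.length : Int) + 1] := by
            have hm : min ((lines.length : Int)) ((pref.length : Int) + 3)
                = (pref.length : Int) + 1 + 1 := by rw [h]; simp; all_goals omega
            rw [hm]; exact PySem.List.pyRange_one_singleton _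
          have g1 : PySem.List.pyGetD lines ((pref.length : Int) + 1) "" = l1 := by
            have h2 := pvGetD_append pref (l :: [l1]) 1 "" (by simp)
            rw [← h] at h2; simpa using h2
          by_cases hP1 : PySem.Str.isIn "for " l1 = true
          · simp at hP1
            simp [PySem.List.enumerate_cons, PySem.List.enumerate_nil,
              hP, hP1, hr, g1]
            rw [pvZf_cons₂, if_pos (by dsimp only; omega)]
            simp
          · simp at hP1
            simp [PySem.List.enumerate_cons, PySem.List.enumerate_nil,
              hP, hP1, hr, g1, pvZf_single]
        · -- suf = l :: l1 :: l2 :: t2: the window is the two next indices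
          have hr : PySem.List.pyRange ((pref.length : Int) + 1)
              (min ((lines.length : Int)) ((pref.length : Int) + 3))
              = [(pref.length : Int) + 1, (pref.length : Int) + 1 + 1] := by
            have hm : min ((lines.length : Int)) ((pref.length : Int) + 3)
                = (pref.length : Int) + 1 + 2 := by rw [h]; simp; all_goals omega
            rw [hm]; exact pvRange_two _
          have g1 : PySem.List.pyGetD lines ((pref.length : Int) + 1) "" = l1 := by
            have h2 := pvGetD_append pref (l :: l1 :: l2 :: t2) 1 "" (by simp)
            rw [← h] at h2; simpa using h2
          have g2 : PySem.List.pyGetD lines ((pref.length : Int) + 1 + 1) "" = l2 := by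
            have h2 := pvGetD_append pref (l :: l1 :: l2 :: t2) 2 "" (by simp)
            rw [← h] at h2
            have e : ((pref.length : Int) + 1 + 1) = (pref.length : Int) + ((2 : Nat) : Int) := by
              push_cast; ring
            rw [e]; simpa using h2
          by_cases hP1 : PySem.Str.isIn "for " l1 = true
          · simp at hP1
            simp [PySem.List.enumerate_cons, List.filter_cons,
              hP, hP1, hr, g1]
            rw [pvZf_cons₂, if_pos (by dsimp only; omega)]
            simp
          · simp at hP1
            by_cases hP2 : PySem.Str.isIn "for " l2 = true
            · simp at hP2
              simp [PySem.List.enumerate_cons,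
                hP, hP1, hP2, hr, g1, g2]
              rw [pvZf_cons₂, if_pos (by dsimp only; omega)]
              simp
            · -- no hit in the window: A moves on, B's head pair has gap ≥ 3
              simp at hP2
              have ih' := ih (pref ++ [l]) (by simpa using h)
              simp only [List.length_append, List.length_cons, List.length_nil] at ih'
              push_cast at ih'
              simp [PySem.List.enumerate_cons,
                hP, hP1, hP2, hr, g1, g2] at ih' ⊢
              refine ih'.trans (congrArg _ (pvZf_drop _ _ ?_).symm)
              intro x hx
              have hm := (List.mem_filter.1 hx).1
              obtain ⟨k, hk, he⟩ := (PySem.List.mem_enumerate_iff _ _ _).1 hm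
              subst he
              dsimp only
              omega
    · -- head line has no 'for ': both sides skip it
      simp at hP
      have ih' := ih (pref ++ [l]) (by simpa using h)
      simp only [List.length_append, List.length_cons, List.length_nil] at ih'
      push_cast at ih'
      simp [hP] at ih' ⊢
      exact ih'

-- ===== VERDICT (by name: the statement is the Claim_ definition above) =====
theorem find_loop_code_py_spec : Claim_equal_find_loop_code_py := by
  intro code _
  unfold Spec_find_loop_code_py find_loop_code_py find_loop_code_py_alt
  dsimp only
  have h := pvMain ((PySem.Str.split? code "\n").getD []) ((PySem.Str.split? code "\n").getD []) [] (by simp)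
  simp only [List.length_nil, Nat.cast_zero] at h
  rw [h]
  rw [show ((((PySem.List.enumerate ((PySem.Str.split? code "\n").getD [])).filter
      (fun p => PySem.Str.isIn "for " p.2)).zip
      ((PySem.List.enumerate ((PySem.Str.split? code "\n").getD [])).filter
      (fun p => PySem.Str.isIn "for " p.2)).tail).find?
      (fun q => decide (q.2.1 - q.1.1 ≤ 2)))
    = pvZf ((PySem.List.enumerate ((PySem.Str.split? code "\n").getD [])).filter
      (fun p => PySem.Str.isIn "for " p.2)) from rfl]
  cases pvZf ((PySem.List.enumerate ((PySem.Str.split? code "\n").getD [])).filter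
      (fun p => PySem.Str.isIn "for " p.2)) <;> simp
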